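-- pv_equiv track=rewrite | github.com/ashfaq-polit/Programmming_Practice | Programming_Practice/IBM_preparation.py | to_alternate_uppercase
-- ===== SOURCE A (Python) =====
-- def to_alternate_uppercase(string):
--     count = 1
--     output = []
--     for i in range(len(string)):
--         if string[i].isalpha():
--             count += 1
--             if count % 2 == 0:
--                 output.append(string[i].upper())
--             else:
--                 output.append(string[i])
--         else:
--             output.append(string[i])
--
--     return ''.join(output)
-- ===== SOURCE B (Python) =====
-- def to_alternate_uppercase(string):
--     letters = [c for c in string if c.isalpha()]
--     transformed = [c.upper() if i % 2 == 0 else c for i, c in enumerate(letters)]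
--     it = iter(transformed)
--     return ''.join(next(it) if c.isalpha() else c for c in string)
-- ===== Notes on version B (the rewrite author's own statement) =====
-- stated objective: alternative
-- what changed: Replaces the single interleaved counter-toggling loop with a two-pass build-then-reassemble shape: collect the alphabetic characters, uppercase those at even indices, then re-merge them with the non-alphabetic characters in one final pass.
import Mathlib
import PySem

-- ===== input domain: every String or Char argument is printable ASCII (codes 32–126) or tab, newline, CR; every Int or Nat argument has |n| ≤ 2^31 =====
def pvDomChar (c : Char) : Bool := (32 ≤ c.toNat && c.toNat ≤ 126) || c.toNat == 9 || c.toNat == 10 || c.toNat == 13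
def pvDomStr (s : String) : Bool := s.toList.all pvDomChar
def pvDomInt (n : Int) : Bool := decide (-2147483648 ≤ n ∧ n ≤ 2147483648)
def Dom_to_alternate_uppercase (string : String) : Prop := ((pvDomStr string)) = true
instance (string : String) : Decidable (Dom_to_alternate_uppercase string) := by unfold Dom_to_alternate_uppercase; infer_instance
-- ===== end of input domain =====

-- B rebuilds the string in two passes (filter letters, alternate-uppercase them by index, re-merge)
-- instead of A's single counter-toggling loop; alternative decomposition, same cost.

-- ===== PORT A =====
def to_alternate_uppercase (string : String) : String :=
  String.mk
    (string.toList.foldl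
      (fun (st : Int × List Char) c =>
        if PySem.Chars.isalpha c then
          if (st.1 + 1) % 2 == 0 then (st.1 + 1, st.2 ++ [PySem.Chars.upperChar c])
          else (st.1 + 1, st.2 ++ [c])
        else (st.1, st.2 ++ [c]))
      (1, [])).2

-- ===== PORT B =====
-- the enumerate-comprehension of Source B: index-carrying alternate uppercasing
def pvAltCaps : Nat → List Char → List Char
  | _, [] => []
  | i, c :: cs => (if i % 2 == 0 then PySem.Chars.upperChar c else c) :: pvAltCaps (i + 1) cs

-- the final join-generator of Source B: emit non-letters, consume the transformed letters in order
def pvReassemble : List Char → List Char → List Char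
  | [], _ => []
  | c :: cs, ts =>
    if PySem.Chars.isalpha c then ts.headD c :: pvReassemble cs ts.tail
    else c :: pvReassemble cs ts

def to_alternate_uppercase_alt (string : String) : String :=
  String.mk
    (pvReassemble string.toList (pvAltCaps 0 (string.toList.filter PySem.Chars.isalpha)))

-- ===== PRECONDITION & SPEC =====
def Spec_to_alternate_uppercase (string : String) (out : String) : Prop := out = to_alternate_uppercase_alt string
instance (string : String) (out : String) : Decidable (Spec_to_alternate_uppercase string out) := by unfold Spec_to_alternate_uppercase; infer_instance

-- ===== CLAIM (what is proved, stated in full; the proofs are below) =====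
def Claim_equal_to_alternate_uppercase : Prop := ∀ (string : String), Dom_to_alternate_uppercase string → Spec_to_alternate_uppercase string (to_alternate_uppercase string)

-- ===== LEMMAS AND PROOFS =====

-- proof-side characterisation of the alternate-uppercased string, indexed by A's counter
def pvG : Int → List Char → List Char
  | _, [] => []
  | count, c :: cs =>
    if PySem.Chars.isalpha c then
      (if (count + 1) % 2 == 0 then PySem.Chars.upperChar c else c) :: pvG (count + 1) cs
    else c :: pvG count cs

theorem pvFoldA (cs : List Char) : ∀ (count : Int) (acc : List Char),
    (cs.foldl
      (fun (st : Int × List Char) c =>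
        if PySem.Chars.isalpha c then
          if (st.1 + 1) % 2 == 0 then (st.1 + 1, st.2 ++ [PySem.Chars.upperChar c])
          else (st.1 + 1, st.2 ++ [c])
        else (st.1, st.2 ++ [c]))
      (count, acc)).2 = acc ++ pvG count cs := by
  induction cs with
  | nil => intro count acc; simp [pvG]
  | cons c cs ih =>
    intro count acc
    rw [List.foldl_cons]
    by_cases h : PySem.Chars.isalpha c = true
    · by_cases hp : ((count + 1) % 2 == 0) = true
      · simp only [h, hp, if_true]
        rw [ih]
        simp [pvG, h, hp]
      · simp only [h, hp, if_true]
        rw [ih]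
        simp [pvG, h, hp]
    · simp only [h, Bool.false_eq_true, if_false]
      rw [ih]
      simp [pvG, h]

theorem pvB (cs : List Char) : ∀ (i : Nat) (count : Int),
    (count + (i : Int)) % 2 = 1 →
    pvReassemble cs (pvAltCaps i (cs.filter PySem.Chars.isalpha)) = pvG count cs := by
  induction cs with
  | nil => intro i count _; simp [pvReassemble, pvG]
  | cons c cs ih =>
    intro i count hpar
    by_cases h : PySem.Chars.isalpha c = true
    · have hfilter : (c :: cs).filter PySem.Chars.isalpha = c :: cs.filter PySem.Chars.isalpha := by
        simp [List.filter, h]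
      rw [hfilter]
      have hparity : (i % 2 == 0) = ((count + 1) % 2 == 0) := by
        by_cases hi : i % 2 = 0
        · have hc : (count + 1) % 2 = 0 := by omega
          simp [hi, hc]
        · have h1 : i % 2 = 1 := by omega
          have hc : (count + 1) % 2 = 1 := by omega
          simp [h1, hc]
      simp only [pvAltCaps, pvReassemble, h, List.headD, List.tail, pvG]
      rw [hparity, ih (i + 1) (count + 1) (by push_cast; omega)]
      simp
    · have hfilter : (c :: cs).filter PySem.Chars.isalpha = cs.filter PySem.Chars.isalpha := by
        simp [List.filter, h]
      rw [hfilter]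
      simp only [pvReassemble, h, pvG]
      rw [ih i count hpar]
      simp

-- ===== VERDICT (by name: the statement is the Claim_ definition above) =====
theorem to_alternate_uppercase_spec : Claim_equal_to_alternate_uppercase := by
  intro s _
  unfold Spec_to_alternate_uppercase to_alternate_uppercase to_alternate_uppercase_alt
  rw [pvFoldA s.toList 1 [], pvB s.toList 0 1 (by omega)]
  rfl
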